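-- pv_equiv track=rewrite | github.com/chronosphereio/addon-templates | .utils/validation-script/validate_addon.py | check_existing_asset_dirs
-- ===== SOURCE A (Python) =====
-- ALL_ASSET_TYPES = {
--     "dashboards": (".yaml", ".yml"),
--     "monitors": (".yaml", ".yml"),
--     "notification-policies": (".yaml", ".yml"),
--     "collectors": (".yaml", ".yml"),
--     "processors": (".json",),
--     "parsers": (".conf",),
-- }
--
-- def check_existing_asset_dirs(vendor_product, files):
--     existing_asset_dirs = set()
--
--     for asset_type in ALL_ASSET_TYPES:
--         if any(f.startswith(f"templates/{vendor_product}/{asset_type}/") for f in files):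
--             existing_asset_dirs.add(asset_type)
--     if not existing_asset_dirs:
--         return set(), [f"templates/{vendor_product}: Must contain at least one asset directory: {', '.join(ALL_ASSET_TYPES)}."]
--     return existing_asset_dirs, []
-- ===== SOURCE B (Python) =====
-- ALL_ASSET_TYPES = {
--     "dashboards": (".yaml", ".yml"),
--     "monitors": (".yaml", ".yml"),
--     "notification-policies": (".yaml", ".yml"),
--     "collectors": (".yaml", ".yml"),
--     "processors": (".json",),
--     "parsers": (".conf",),
-- }
--
-- def check_existing_asset_dirs(vendor_product, files):
--     prefix = f"templates/{vendor_product}/"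
--     segs = set()
--     for f in files:
--         if f.startswith(prefix):
--             rest = f[len(prefix):]
--             i = rest.find("/")
--             if i != -1:
--                 segs.add(rest[:i])
--     existing_asset_dirs = {t for t in ALL_ASSET_TYPES if t in segs}
--     if not existing_asset_dirs:
--         return set(), [f"templates/{vendor_product}: Must contain at least one asset directory: {', '.join(ALL_ASSET_TYPES)}."]
--     return existing_asset_dirs, []
-- ===== Notes on version B (the rewrite author's own statement) =====
-- stated objective: faster
-- what changed: Instead of scanning the whole file list once per asset type (6 startswith passes), B makes a single pass over files, extracting the first path segment after the 'templates/<vendor_product>/' prefix into a set, then intersects the known asset-type keys with that set.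
import Mathlib
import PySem

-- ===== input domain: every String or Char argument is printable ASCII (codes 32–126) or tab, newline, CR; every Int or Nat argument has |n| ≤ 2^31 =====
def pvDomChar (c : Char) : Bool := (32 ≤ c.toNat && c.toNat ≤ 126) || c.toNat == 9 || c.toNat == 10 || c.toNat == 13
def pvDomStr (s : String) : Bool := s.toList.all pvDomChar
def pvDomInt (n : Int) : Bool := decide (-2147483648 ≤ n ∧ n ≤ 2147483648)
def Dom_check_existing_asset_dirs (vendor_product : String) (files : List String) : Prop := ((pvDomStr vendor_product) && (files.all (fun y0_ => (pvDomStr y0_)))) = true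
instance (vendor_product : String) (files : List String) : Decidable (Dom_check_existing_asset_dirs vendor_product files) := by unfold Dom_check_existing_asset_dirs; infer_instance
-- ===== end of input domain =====

-- B replaces A's one-scan-of-files-per-asset-type with a single pass over files that collects
-- first path segments under the prefix, then intersects with the asset-type keys (objective: faster, constant-factor).
-- The returned first component is a Python set; this file proves the ports produce it in the
-- same (asset-type key) insertion order, hence full equality.

-- keys of ALL_ASSET_TYPES, in dict insertion order (shared module-level constant)
def pvAssetTypes : List String :=
  ["dashboards", "monitors", "notification-policies", "collectors", "processors", "parsers"]

-- the f-string error message (identical in A and B)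
def pvErrMsg (vendor_product : String) : String :=
  "templates/" ++ vendor_product ++ ": Must contain at least one asset directory: " ++
    PySem.Str.join ", " pvAssetTypes ++ "."

-- ===== PORT A =====
def check_existing_asset_dirs (vendor_product : String) (files : List String) : List String × List String :=
  let existing_asset_dirs : PySem.Set String :=
    pvAssetTypes.foldl (fun acc asset_type =>
      if files.any (fun f =>
          PySem.Str.startswith f ("templates/" ++ vendor_product ++ "/" ++ asset_type ++ "/"))
      then PySem.Set.add acc asset_type else acc) PySem.Set.empty
  if existing_asset_dirs = [] then
    ([], [pvErrMsg vendor_product])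
  else
    (existing_asset_dirs, [])

-- ===== PORT B =====
def check_existing_asset_dirs_alt (vendor_product : String) (files : List String) : List String × List String :=
  let pre := "templates/" ++ vendor_product ++ "/"
  let segs : PySem.Set String :=
    files.foldl (fun acc f =>
      if PySem.Str.startswith f pre then
        let rest := PySem.Str.slice f (some (PySem.Str.len pre)) none
        let i := PySem.Str.find rest "/"
        if i ≠ -1 then PySem.Set.add acc (PySem.Str.slice rest none (some i)) else acc
      else acc) PySem.Set.empty
  let existing_asset_dirs : PySem.Set String :=
    pvAssetTypes.foldl (fun acc t =>
      if PySem.Set.contains segs t then PySem.Set.add acc t else acc) PySem.Set.empty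
  if existing_asset_dirs = [] then
    ([], [pvErrMsg vendor_product])
  else
    (existing_asset_dirs, [])

-- ===== PRECONDITION & SPEC =====
def Spec_check_existing_asset_dirs (vendor_product : String) (files : List String) (out : List String × List String) : Prop := out = check_existing_asset_dirs_alt vendor_product files
instance (vendor_product : String) (files : List String) (out : List String × List String) : Decidable (Spec_check_existing_asset_dirs vendor_product files out) := by unfold Spec_check_existing_asset_dirs; infer_instance

-- ===== CLAIM (what is proved, stated in full; the proofs are below) =====
def Claim_equal_check_existing_asset_dirs : Prop := ∀ (vendor_product : String) (files : List String), Dom_check_existing_asset_dirs vendor_product files → Spec_check_existing_asset_dirs vendor_product files (check_existing_asset_dirs vendor_product files)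

-- ===== LEMMAS AND PROOFS =====

-- membership in the seg-collecting fold of B
theorem mem_condAdd_foldl {α β : Type} [BEq β] [LawfulBEq β] (l : List α) (P : α → Bool)
    (Q : α → Prop) [DecidablePred Q] (g : α → β) (s : PySem.Set β) (y : β) :
    y ∈ l.foldl (fun acc x => if P x then (if Q x then PySem.Set.add acc (g x) else acc) else acc) s ↔
      y ∈ s ∨ ∃ x ∈ l, P x = true ∧ Q x ∧ g x = y := by
  induction l generalizing s with
  | nil => simp
  | cons a l ih =>
    simp only [List.foldl_cons, List.mem_cons]
    by_cases hP : P a = true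
    · by_cases hQ : Q a
      · rw [if_pos hP, if_pos hQ, ih]
        simp only [PySem.Set.mem_add]
        constructor
        · rintro ((h1 | rfl) | ⟨x, hx, hPx, hQx, rfl⟩)
          · exact Or.inl h1
          · exact Or.inr ⟨a, Or.inl rfl, hP, hQ, rfl⟩
          · exact Or.inr ⟨x, Or.inr hx, hPx, hQx, rfl⟩
        · rintro (h1 | ⟨x, (rfl | hx), hPx, hQx, rfl⟩)
          · exact Or.inl (Or.inl h1)
          · exact Or.inl (Or.inr rfl)
          · exact Or.inr ⟨x, hx, hPx, hQx, rfl⟩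
      · rw [if_pos hP, if_neg hQ, ih]
        constructor
        · rintro (h1 | ⟨x, hx, hPx, hQx, rfl⟩)
          · exact Or.inl h1
          · exact Or.inr ⟨x, Or.inr hx, hPx, hQx, rfl⟩
        · rintro (h1 | ⟨x, (rfl | hx), hPx, hQx, rfl⟩)
          · exact Or.inl h1
          · exact absurd hQx hQ
          · exact Or.inr ⟨x, hx, hPx, hQx, rfl⟩
    · rw [if_neg hP, ih]
      constructor
      · rintro (h1 | ⟨x, hx, hPx, hQx, rfl⟩)
        · exact Or.inl h1
        · exact Or.inr ⟨x, Or.inr hx, hPx, hQx, rfl⟩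
      · rintro (h1 | ⟨x, (rfl | hx), hPx, hQx, rfl⟩)
        · exact Or.inl h1
        · exact absurd hPx hP
        · exact Or.inr ⟨x, hx, hPx, hQx, rfl⟩

-- the position of the first '/' after a slash-free block T is |T|
theorem find_slash_block (T u : List Char) (hT : '/' ∉ T) :
    PySem.Chars.find (T ++ '/' :: u) ['/'] = (T.length : Int) := by
  set R := T ++ '/' :: u with hR
  have hinfix : ['/'] <:+: R := ⟨T, u, by simp [hR]⟩
  have hnn : 0 ≤ PySem.Chars.find R ['/'] := (PySem.Chars.find_nonneg_iff R ['/']).mpr hinfix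
  obtain ⟨hpre, hmin⟩ := PySem.Chars.find_spec hnn
  set n := (PySem.Chars.find R ['/']).toNat with hn
  have hTn : ¬ n < T.length := by
    intro hlt
    obtain ⟨v, hv⟩ := hpre
    have hlen : n < R.length := by simp [hR]; omega
    have hget : R[n]'hlen = '/' := by
      have h1 : R[n]? = some '/' := by
        have := congrArg (fun l => l[0]?) hv.symm
        simpa [List.getElem?_drop] using this
      simpa [List.getElem?_eq_getElem hlen] using h1
    have h2 : R[n]'hlen = T[n]'hlt := by
      simp [hR, List.getElem_append_left hlt]
    exact hT (hget ▸ h2 ▸ List.getElem_mem hlt)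
  have hTge : ¬ T.length < n := fun hlt => hmin T.length hlt ⟨u, by simp [hR]⟩
  have : n = T.length := by omega
  omega

-- the per-file condition equivalence, on char lists
theorem startswith_block_iff (p T F : List Char) (hT : '/' ∉ T) :
    ((p ++ T ++ ['/']) <+: F) ↔
      (p <+: F ∧ PySem.Chars.find (F.drop p.length) ['/'] ≠ -1 ∧
        (F.drop p.length).take (PySem.Chars.find (F.drop p.length) ['/']).toNat = T) := by
  constructor
  · rintro ⟨u, hu⟩
    have hF : F = p ++ (T ++ '/' :: u) := by simpa using hu.symm
    have hdrop : F.drop p.length = T ++ '/' :: u := by simp [hF]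
    have hfind := find_slash_block T u hT
    refine ⟨⟨T ++ '/' :: u, hF.symm⟩, ?_, ?_⟩
    · rw [hdrop, hfind]; omega
    · rw [hdrop, hfind]; simp
  · rintro ⟨⟨r, hr⟩, hne, htake⟩
    have hnn : 0 ≤ PySem.Chars.find (F.drop p.length) ['/'] :=
      (PySem.Chars.find_nonneg_iff _ _).mpr ((PySem.Chars.find_ne_neg_one_iff _ _).mp hne)
    obtain ⟨hpre, -⟩ := PySem.Chars.find_spec hnn
    obtain ⟨v, hv⟩ := hpre
    have hsplit : F.drop p.length = T ++ '/' :: v := by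
      conv_lhs => rw [← List.take_append_drop (PySem.Chars.find (F.drop p.length) ['/']).toNat (F.drop p.length)]
      rw [htake, ← hv]
      simp
    have hF : F = p ++ (T ++ '/' :: v) := by
      conv_lhs => rw [← hr]
      have hdropr : F.drop p.length = r := by
        have := congrArg (List.drop p.length) hr
        simpa using this.symm
      rw [← hdropr, hsplit]
    exact ⟨v, by rw [hF]; simp⟩

-- facts about the six asset-type keys, decided at once
theorem assetTypes_ok : ∀ t ∈ pvAssetTypes, ('/' ∉ t.toList) := by decide

-- the per-file condition equivalence, lifted to strings
theorem cond_iff (pre t f : String) (ht : '/' ∉ t.toList) :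
  PySem.Str.startswith f (pre ++ t ++ "/") = true ↔
    (PySem.Str.startswith f pre = true ∧
     (PySem.Str.find (PySem.Str.slice f (some (PySem.Str.len pre)) none) "/" ≠ -1 ∧
     PySem.Str.slice (PySem.Str.slice f (some (PySem.Str.len pre)) none) none
       (some (PySem.Str.find (PySem.Str.slice f (some (PySem.Str.len pre)) none) "/")) = t)) := by
  have hslash : ("/" : String).toList = ['/'] := by decide
  have hlen : (0:Int) ≤ PySem.Str.len pre := by simp [PySem.Str.len]
  have hfind : PySem.Str.find (PySem.Str.slice f (some (PySem.Str.len pre)) none) "/"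
      = PySem.Chars.find (f.toList.drop pre.toList.length) ['/'] := by
    rw [PySem.Str.find_eq]
    have hrest : (PySem.Str.slice f (some (PySem.Str.len pre)) none).toList
        = f.toList.drop pre.toList.length := by
      simp only [PySem.Str.slice, String.toList_ofList, PySem.Chars.slice_eq_listSlice]
      rw [PySem.List.slice_from f.toList hlen]
      simp [PySem.Str.len]
    rw [hrest, hslash]
  have hsw : PySem.Str.startswith f (pre ++ t ++ "/") = true ↔ (pre.toList ++ t.toList ++ ['/']) <+: f.toList := by
    rw [PySem.Str.startswith_eq, PySem.Chars.startswith_iff]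
    simp [hslash]
  have hsw2 : PySem.Str.startswith f pre = true ↔ pre.toList <+: f.toList := by
    rw [PySem.Str.startswith_eq, PySem.Chars.startswith_iff]
  have hslice : PySem.List.slice f.toList (some (PySem.Str.len pre)) none = f.toList.drop pre.toList.length := by
    rw [PySem.List.slice_from f.toList hlen]; simp [PySem.Str.len]
  rw [hsw, startswith_block_iff _ _ _ ht, hsw2, hfind]
  refine and_congr Iff.rfl ?_
  constructor
  · rintro ⟨h2, h3⟩
    have hnn : (0:Int) ≤ PySem.Chars.find (f.toList.drop pre.toList.length) ['/'] :=
      (PySem.Chars.find_nonneg_iff _ _).mpr ((PySem.Chars.find_ne_neg_one_iff _ _).mp h2)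
    refine ⟨h2, ?_⟩
    apply String.toList_inj.mp
    simp only [PySem.Str.slice, String.toList_ofList, PySem.Chars.slice_eq_listSlice,
      PySem.List.slice_to _ hnn, hslice]
    exact h3
  · rintro ⟨h2, h3⟩
    have hnn : (0:Int) ≤ PySem.Chars.find (f.toList.drop pre.toList.length) ['/'] :=
      (PySem.Chars.find_nonneg_iff _ _).mpr ((PySem.Chars.find_ne_neg_one_iff _ _).mp h2)
    refine ⟨h2, ?_⟩
    have := congrArg String.toList h3
    simpa only [PySem.Str.slice, String.toList_ofList, PySem.Chars.slice_eq_listSlice, hfind,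
      PySem.List.slice_to _ hnn, hslice] using this

-- per asset type: A's any-test equals membership in B's seg set
theorem cond_eq (vp : String) (files : List String) (t : String) (ht : '/' ∉ t.toList) :
    files.any (fun f => PySem.Str.startswith f ("templates/" ++ vp ++ "/" ++ t ++ "/"))
      = PySem.Set.contains (files.foldl (fun acc f =>
          if PySem.Str.startswith f ("templates/" ++ vp ++ "/") then
            if PySem.Str.find (PySem.Str.slice f (some (PySem.Str.len ("templates/" ++ vp ++ "/"))) none) "/" ≠ -1 then
              PySem.Set.add acc (PySem.Str.slice (PySem.Str.slice f (some (PySem.Str.len ("templates/" ++ vp ++ "/"))) none) none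
                (some (PySem.Str.find (PySem.Str.slice f (some (PySem.Str.len ("templates/" ++ vp ++ "/"))) none) "/")))
            else acc
          else acc) PySem.Set.empty) t := by
  rw [Bool.eq_iff_iff, List.any_eq_true, PySem.Set.contains_iff,
    mem_condAdd_foldl files (fun f => PySem.Str.startswith f ("templates/" ++ vp ++ "/"))
      (fun f => PySem.Str.find (PySem.Str.slice f (some (PySem.Str.len ("templates/" ++ vp ++ "/"))) none) "/" ≠ -1)
      (fun f => PySem.Str.slice (PySem.Str.slice f (some (PySem.Str.len ("templates/" ++ vp ++ "/"))) none) none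
        (some (PySem.Str.find (PySem.Str.slice f (some (PySem.Str.len ("templates/" ++ vp ++ "/"))) none) "/")))]
  have hempty : ∀ y : String, y ∈ (PySem.Set.empty : PySem.Set String) ↔ False := by
    intro y; simp [PySem.Set.empty]
  rw [hempty, false_or]
  exact exists_congr fun f => and_congr Iff.rfl (cond_iff ("templates/" ++ vp ++ "/") t f ht)

-- the two asset-type folds agree
theorem existing_eq (vp : String) (files : List String) :
    pvAssetTypes.foldl (fun acc t =>
        if files.any (fun f => PySem.Str.startswith f ("templates/" ++ vp ++ "/" ++ t ++ "/"))
        then PySem.Set.add acc t else acc) PySem.Set.empty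
      = pvAssetTypes.foldl (fun acc t =>
          if PySem.Set.contains (files.foldl (fun acc f =>
              if PySem.Str.startswith f ("templates/" ++ vp ++ "/") then
                if PySem.Str.find (PySem.Str.slice f (some (PySem.Str.len ("templates/" ++ vp ++ "/"))) none) "/" ≠ -1 then
                  PySem.Set.add acc (PySem.Str.slice (PySem.Str.slice f (some (PySem.Str.len ("templates/" ++ vp ++ "/"))) none) none
                    (some (PySem.Str.find (PySem.Str.slice f (some (PySem.Str.len ("templates/" ++ vp ++ "/"))) none) "/")))
                else acc
              else acc) PySem.Set.empty) t
          then PySem.Set.add acc t else acc) PySem.Set.empty := by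
  apply PySem.List.foldl_congr_mem
  intro acc t htmem
  rw [cond_eq vp files t (assetTypes_ok t htmem)]

-- ===== VERDICT (by name: the statement is the Claim_ definition above) =====
theorem check_existing_asset_dirs_spec : Claim_equal_check_existing_asset_dirs := by
  intro vendor_product files _
  unfold Spec_check_existing_asset_dirs
  unfold check_existing_asset_dirs check_existing_asset_dirs_alt
  simp only [existing_eq vendor_product files]
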